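-- pv_equiv track=rewrite | github.com/3-manifolds/SnapPy | python/ptolemy/reginaWrapper.py | _compute_sign
-- ===== SOURCE A (Python) =====
-- def _compute_sign(ptolemy_index, perm):
--     """
--     This is reimplementing _compute_sign
--     from addl_code/ptolemy_equations.c
--     """
--
--     # Following Remark 5.7 of
--     # Garoufalidis, Goerner, Zickert:
--     # Gluing Equations for PGL(n,C)-Representations of 3-Manifolds
--     # http://arxiv.org/abs/1207.6711
--     # we discard all even entries and get a permutation called
--     # "effective_perm" here.
--     effective_perm = []
--     for v in range(4):
--         if ptolemy_index[v] % 2: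
--             effective_perm.append(perm[v])
--
--     # We need to detect whether effective_perm is even or odd
--     # It has at most 3 elements, distinguish cases:
--
--     # Cases of length 0 and 1
--     if len(effective_perm) < 2:
--         return +1
--
--     # Case of length 2: either it is a transposition or not
--     if len(effective_perm) == 2:
--         if effective_perm[0] < effective_perm[1]:
--             return +1
--         return -1
--
--     # Case of length 3: even permutations = cyclic permutations
--     if len(effective_perm) == 3:
--         # Test whether cyclic permutation by i, including identity
--         for i in range(3):
--             if ( (effective_perm[ i     ] < effective_perm[(i+1)%3]) and
--                  (effective_perm[(i+1)%3] < effective_perm[(i+2)%3])):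
--                 return +1
--         return -1
--
--     # index is for a face so one number in index is zero and len < 4,
--     # we should never reach here
--     raise Exception("Should never reach here")
-- ===== SOURCE B (Python) =====
-- def _compute_sign(ptolemy_index, perm):
--     # Same selection as A: keep perm[v] where ptolemy_index[v] is odd.
--     effective_perm = [perm[v] for v in range(4) if ptolemy_index[v] % 2]
--
--     if len(effective_perm) >= 4:
--         raise Exception("Should never reach here")
--
--     # Uniform rule replacing A's per-length case analysis:
--     # parity of the number of inversions.
--     n = len(effective_perm)
--     inversions = sum(
--         1
--         for i in range(n)
--         for j in range(n)
--         if i < j and effective_perm[i] > effective_perm[j]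
--     )
--     return 1 if inversions % 2 == 0 else -1
-- ===== Notes on version B (the rewrite author's own statement) =====
-- stated objective: simpler
-- what changed: Replaces A's per-length case analysis (length dispatch plus a cyclic-rotation test for length 3) with a single uniform inversion-count parity over the selected entries.
-- outside the precondition, e.g. on _compute_sign([1, 1, 1, 2], [0, 0, 1, 5]): A returns -1, B returns 1
import Mathlib
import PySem

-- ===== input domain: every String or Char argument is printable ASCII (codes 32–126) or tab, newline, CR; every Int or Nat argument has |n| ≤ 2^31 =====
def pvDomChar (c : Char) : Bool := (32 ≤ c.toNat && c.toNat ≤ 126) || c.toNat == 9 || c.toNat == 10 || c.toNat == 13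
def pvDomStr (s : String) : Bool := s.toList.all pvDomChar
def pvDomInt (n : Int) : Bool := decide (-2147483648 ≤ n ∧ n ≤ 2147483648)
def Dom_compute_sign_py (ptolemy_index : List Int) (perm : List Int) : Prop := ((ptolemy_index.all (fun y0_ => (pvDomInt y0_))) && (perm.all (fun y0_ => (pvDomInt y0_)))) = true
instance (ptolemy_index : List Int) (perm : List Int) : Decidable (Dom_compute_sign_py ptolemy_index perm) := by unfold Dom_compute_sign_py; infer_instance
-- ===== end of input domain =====

-- B replaces A's per-length case dispatch (with a cyclic-rotation test for length 3)
-- by one uniform inversion-count parity; objective: simpler.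


-- ===== PORT A =====
-- sign of the effective permutation after building it, A's per-length case analysis
-- (the `else 0` arm is Python's `raise Exception`, excluded by Pre_)
def pvSignCasesA (eff : List Int) : Int :=
  if eff.length < 2 then 1
  else if eff.length = 2 then
    (if eff.getD 0 0 < eff.getD 1 0 then 1 else -1)
  else if eff.length = 3 then
    (if (List.range 3).any (fun i =>
        decide (eff.getD (i % 3) 0 < eff.getD ((i + 1) % 3) 0) &&
        decide (eff.getD ((i + 1) % 3) 0 < eff.getD ((i + 2) % 3) 0))
     then 1 else -1)
  else 0

-- out-of-range list accesses are IndexError in Python, excluded by Pre_ (getD is exact inside Pre_)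
def compute_sign_py (ptolemy_index : List Int) (perm : List Int) : Int :=
  pvSignCasesA ((List.range 4).foldl (fun acc v =>
    if ptolemy_index.getD v 0 % 2 ≠ 0 then acc ++ [perm.getD v 0] else acc) [])

-- ===== PORT B =====
-- inversion-count parity (the `if 4 ≤ …` arm is B's raise, excluded by Pre_)
def pvSignInv (eff : List Int) : Int :=
  if 4 ≤ eff.length then 0
  else
    let n := eff.length
    let inversions := ((List.range n).map (fun i =>
      ((List.range n).filter (fun j =>
        decide (i < j ∧ eff.getD j 0 < eff.getD i 0))).length)).sum
    if inversions % 2 = 0 then 1 else -1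

def compute_sign_py_alt (ptolemy_index : List Int) (perm : List Int) : Int :=
  pvSignInv ((List.range 4).filterMap (fun v =>
    if ptolemy_index.getD v 0 % 2 ≠ 0 then some (perm.getD v 0) else none))

-- ===== PRECONDITION & SPEC =====
-- Pre_ excludes inputs where Python raises (ptolemy_index shorter than 4: IndexError;
-- perm too short at an odd position: IndexError; all four entries odd: explicit raise in both A and B)
-- and, as the one class where A still returns, inputs whose selected perm entries contain a
-- duplicate: perm is meant to be a permutation, and on duplicates A's comparison-based case
-- analysis and B's inversion parity pick different, equally accidental values.
def Pre_compute_sign_py (ptolemy_index : List Int) (perm : List Int) : Prop :=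
  4 ≤ ptolemy_index.length ∧
  (∀ v < 4, ptolemy_index.getD v 0 % 2 ≠ 0 → v < perm.length) ∧
  (∃ v < 4, ptolemy_index.getD v 0 % 2 = 0) ∧
  ((List.range 4).filterMap (fun v =>
    if ptolemy_index.getD v 0 % 2 ≠ 0 then some (perm.getD v 0) else none)).Nodup
instance (ptolemy_index : List Int) (perm : List Int) : Decidable (Pre_compute_sign_py ptolemy_index perm) := by unfold Pre_compute_sign_py; infer_instance

def pvWitness_compute_sign_py : List Int × List Int := ([1, 1, 0, 0], [3, 2, 1, 0])

def Spec_compute_sign_py (ptolemy_index : List Int) (perm : List Int) (out : Int) : Prop := out = compute_sign_py_alt ptolemy_index perm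
instance (ptolemy_index : List Int) (perm : List Int) (out : Int) : Decidable (Spec_compute_sign_py ptolemy_index perm out) := by unfold Spec_compute_sign_py; infer_instance

-- ===== CLAIM (what is proved, stated in full; the proofs are below) =====
def Claim_equal_compute_sign_py : Prop := ∀ (ptolemy_index : List Int) (perm : List Int), Dom_compute_sign_py ptolemy_index perm → Pre_compute_sign_py ptolemy_index perm → Spec_compute_sign_py ptolemy_index perm (compute_sign_py ptolemy_index perm)

-- ===== LEMMAS AND PROOFS =====

-- a foldl-append loop is the corresponding filterMap
theorem pv_fold_filterMap (p : Nat → Prop) [DecidablePred p] (g : Nat → Int)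
    (l : List Nat) (acc : List Int) :
    l.foldl (fun acc v => if p v then acc ++ [g v] else acc) acc =
    acc ++ l.filterMap (fun v => if p v then some (g v) else none) := by
  induction l generalizing acc with
  | nil => simp
  | cons x xs ih => by_cases h : p x <;> simp [h, ih]

-- the two builds of effective_perm produce the same list
theorem pv_build_eq (ptolemy_index perm : List Int) :
    (List.range 4).foldl (fun acc v =>
      if ptolemy_index.getD v 0 % 2 ≠ 0 then acc ++ [perm.getD v 0] else acc) [] =
    (List.range 4).filterMap (fun v =>
      if ptolemy_index.getD v 0 % 2 ≠ 0 then some (perm.getD v 0) else none) := by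
  simpa using pv_fold_filterMap (fun v => ptolemy_index.getD v 0 % 2 ≠ 0)
    (fun v => perm.getD v 0) (List.range 4) []

-- filterMap drops at least one element when some member maps to none
theorem pv_filterMap_lt (f : Nat → Option Int) (l : List Nat) (v : Nat)
    (hv : v ∈ l) (hf : f v = none) : (l.filterMap f).length < l.length := by
  induction l with
  | nil => cases hv
  | cons x xs ih =>
    rcases List.mem_cons.mp hv with rfl | hv'
    · simp only [List.filterMap_cons, hf, List.length_cons]
      exact Nat.lt_succ_of_le (List.length_filterMap_le f xs)
    · cases hfx : f x <;> simp only [List.filterMap_cons, hfx, List.length_cons]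
      · exact Nat.lt_succ_of_lt (ih hv')
      · exact Nat.succ_lt_succ (ih hv')

-- with some even entry among the first four, the selection has at most 3 elements
theorem pv_len_le (ptolemy_index perm : List Int)
    (h : ∃ v < 4, ptolemy_index.getD v 0 % 2 = 0) :
    ((List.range 4).filterMap (fun v =>
      if ptolemy_index.getD v 0 % 2 ≠ 0 then some (perm.getD v 0) else none)).length ≤ 3 := by
  obtain ⟨v, hv, he⟩ := h
  have := pv_filterMap_lt
    (fun v => if ptolemy_index.getD v 0 % 2 ≠ 0 then some (perm.getD v 0) else none)
    (List.range 4) v (List.mem_range.mpr hv) (if_neg (not_not_intro he))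
  simpa using Nat.lt_succ_iff.mp (by simpa using this)

-- key: on a duplicate-free list of length ≤ 3, A's case analysis equals inversion parity
theorem pv_sign_eq (e : List Int) (hd : e.Nodup) (hl : e.length ≤ 3) :
    pvSignCasesA e = pvSignInv e := by
  match e with
  | [] => rfl
  | [a] => rfl
  | [a, b] =>
    have hab : a ≠ b := by simpa using hd
    rcases lt_trichotomy a b with h | h | h
    · simp [pvSignCasesA, pvSignInv, List.range_succ, h, not_lt.mpr h.le]
    · exact absurd h hab
    · simp [pvSignCasesA, pvSignInv, List.range_succ, h, not_lt.mpr h.le]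
  | [a, b, c] =>
    have hab : a ≠ b := by simp at hd; tauto
    have hac : a ≠ c := by simp at hd; tauto
    have hbc : b ≠ c := by simp at hd; tauto
    rcases lt_trichotomy a b with h1 | h1 | h1 <;>
    rcases lt_trichotomy b c with h2 | h2 | h2 <;>
    rcases lt_trichotomy a c with h3 | h3 | h3 <;>
      first
      | exact absurd h1 hab | exact absurd h2 hbc | exact absurd h3 hac
      | (exfalso; omega)
      | simp [pvSignCasesA, pvSignInv, List.range_succ, h1, h2, h3,
              not_lt.mpr h1.le, not_lt.mpr h2.le, not_lt.mpr h3.le, le_of_lt]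
  | _ :: _ :: _ :: _ :: _ => exfalso; simp at hl; omega

-- ===== VERDICT (by name: the statement is the Claim_ definition above) =====
theorem compute_sign_py_spec : Claim_equal_compute_sign_py := by
  intro ptolemy_index perm _ hpre
  obtain ⟨_, _, hex, hnd⟩ := hpre
  unfold Spec_compute_sign_py compute_sign_py compute_sign_py_alt
  rw [pv_build_eq]
  exact pv_sign_eq _ hnd (pv_len_le ptolemy_index perm hex)
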